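-- pv_equiv track=rewrite | github.com/travisCxy/deblur | att_model_2.2/projects/ch/common.py | frac_count
-- ===== SOURCE A (Python) =====
-- def frac_count(s):
--     frac_lens =[0]
--     current_frac = ""
--     is_frac = False
--     for c in s:
--         if c == '`':
--             is_frac = not is_frac
--             if not is_frac:
--                 frac_lens.append(len(current_frac))
--                 current_frac = ""
--             continue
--         else:
--             if is_frac:
--                 current_frac += c
--     return max(frac_lens)
-- ===== SOURCE B (Python) =====
-- def frac_count(s):
--     # spans closed by a matching backtick are every other piece of s.split('`'),
--     # starting at piece 1; zip(it, it) pairs them up and drops a dangling tail.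
--     it = iter(s.split('`')[1:])
--     return max((len(span) for span, _ in zip(it, it)), default=0)
-- ===== Notes on version B (the rewrite author's own statement) =====
-- stated objective: simpler
-- what changed: Replaced the per-character toggle state machine with split('`') followed by pairing up the resulting pieces (zip over one iterator), taking the max length of every other piece so a dangling unclosed span is dropped automatically.
import Mathlib
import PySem

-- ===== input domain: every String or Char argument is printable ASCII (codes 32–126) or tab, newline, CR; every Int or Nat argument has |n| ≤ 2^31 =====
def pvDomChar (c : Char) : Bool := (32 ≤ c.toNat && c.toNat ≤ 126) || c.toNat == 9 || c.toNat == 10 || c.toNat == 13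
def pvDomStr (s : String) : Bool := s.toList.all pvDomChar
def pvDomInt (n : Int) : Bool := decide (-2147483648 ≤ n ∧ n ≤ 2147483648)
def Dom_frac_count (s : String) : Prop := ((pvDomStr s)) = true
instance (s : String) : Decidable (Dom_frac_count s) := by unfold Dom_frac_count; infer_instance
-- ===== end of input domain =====

-- B replaces A's per-character toggle state machine with split('`') plus pairwise grouping
-- of the pieces (simpler); return-value equivalence only, neither mutates its argument.

-- ===== PORT A =====
-- one step of A's for-loop over the characters; state = (frac_lens, current_frac, is_frac)
def stepA (st : List Int × List Char × Bool) (c : Char) : List Int × List Char × Bool :=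
  if c = '`' then
    let is_frac := !st.2.2
    if !is_frac then (st.1 ++ [(st.2.1.length : Int)], ([] : List Char), is_frac)
    else (st.1, st.2.1, is_frac)
  else
    if st.2.2 then (st.1, st.2.1 ++ [c], st.2.2) else st

def frac_count (s : String) : Int :=
  let final := s.toList.foldl stepA (([0] : List Int), ([] : List Char), false)
  -- frac_lens starts as [0] and only grows, so Python's max(frac_lens) never raises;
  -- the .getD 0 default is unreachable
  (PySem.List.max? final.1 id).getD 0

-- ===== PORT B =====
-- zip(it, it) over ONE iterator groups the list into consecutive disjoint pairs,
-- dropping a dangling last element; ported exactly as this recursion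
def pairUp {α : Type} : List α → List (α × α)
  | a :: b :: r => (a, b) :: pairUp r
  | _ => []

def frac_count_alt (s : String) : Int :=
  let pieces := PySem.List.slice (PySem.Chars.splitOn s.toList ['`']) (some 1) none  -- s.split('`')[1:]
  PySem.List.maxD ((pairUp pieces).map (fun p => (p.1.length : Int))) id 0

-- ===== PRECONDITION & SPEC =====
def Spec_frac_count (s : String) (out : Int) : Prop := out = frac_count_alt s
instance (s : String) (out : Int) : Decidable (Spec_frac_count s out) := by unfold Spec_frac_count; infer_instance

-- ===== CLAIM (what is proved, stated in full; the proofs are below) =====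
def Claim_equal_frac_count : Prop := ∀ (s : String), Dom_frac_count s → Spec_frac_count s (frac_count s)

-- ===== LEMMAS AND PROOFS =====

-- reference splitter: spR cur cs = remaining pieces of a single-char '`' split,
-- with cur the (reversed) partial piece being built
def spR : List Char → List Char → List (List Char)
  | cur, [] => [cur.reverse]
  | cur, x :: r => if x = '`' then cur.reverse :: spR [] r else spR (x :: cur) r

-- lengths of the closed spans, as A's scan sees them: outS = scanning outside a span,
-- inS acc = inside a span with partial content acc
mutual
def outS : List Char → List Int
  | [] => []
  | c :: r => if c = '`' then inS [] r else outS r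
def inS : List Char → List Char → List Int
  | _, [] => []
  | acc, c :: r => if c = '`' then (acc.length : Int) :: outS r else inS (acc ++ [c]) r
end

lemma spR_ne_nil : ∀ (cs cur : List Char), spR cur cs ≠ [] := by
  intro cs
  induction cs with
  | nil => intro cur; simp [spR]
  | cons x r ih =>
    intro cur
    by_cases hx : x = '`'
    · simp [spR, hx]
    · simpa [spR, hx] using ih (x :: cur)

lemma tail_spR (cs : List Char) : ∀ cur, (spR cur cs).tail = (spR [] cs).tail := by
  induction cs with
  | nil => intro cur; simp [spR]
  | cons x r ih =>
    intro cur
    by_cases hx : x = '`'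
    · simp [spR, hx]
    · simp only [spR, if_neg hx]
      rw [ih, ih [x]]

lemma go_spec (l : List Char) : ∀ (fuel : Nat) (cur : List Char) (acc : List (List Char)),
    l.length < fuel →
    PySem.Chars.splitOn.go ['`'] fuel l cur acc = acc.reverse ++ spR cur l := by
  induction l with
  | nil =>
    intro fuel cur acc h
    cases fuel with
    | zero => omega
    | succ f => simp [PySem.Chars.splitOn.go, spR]
  | cons x r ih =>
    intro fuel cur acc h
    cases fuel with
    | zero => omega
    | succ f =>
      by_cases hx : x = '`'
      · subst hx
        rw [show PySem.Chars.splitOn.go ['`'] (f + 1) ('`' :: r) cur acc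
              = PySem.Chars.splitOn.go ['`'] f r [] (cur.reverse :: acc) from by
            simp [PySem.Chars.splitOn.go, List.isPrefixOf]]
        rw [ih f [] (cur.reverse :: acc) (by simpa using h)]
        simp [spR]
      · have hpre : List.isPrefixOf ['`'] (x :: r) = false := by
          simp [List.isPrefixOf]; exact fun h' => absurd h'.symm hx
        rw [show PySem.Chars.splitOn.go ['`'] (f + 1) (x :: r) cur acc
              = PySem.Chars.splitOn.go ['`'] f r (x :: cur) acc from by
            simp [PySem.Chars.splitOn.go, hpre]]
        rw [ih f (x :: cur) acc (by simpa using h)]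
        simp [spR, hx]

lemma splitOn_eq_spR (cs : List Char) : PySem.Chars.splitOn cs ['`'] = spR [] cs := by
  unfold PySem.Chars.splitOn
  rw [go_spec cs (cs.length + 1) [] [] (by omega)]
  simp

-- A's fold: the final frac_lens is the initial one extended by the closed-span lengths
lemma fold_spec (cs : List Char) :
    (∀ lens : List Int, (List.foldl stepA (lens, ([] : List Char), false) cs).1 = lens ++ outS cs)
    ∧ (∀ (lens : List Int) (acc : List Char),
        (List.foldl stepA (lens, acc, true) cs).1 = lens ++ inS acc cs) := by
  induction cs with
  | nil => simp [outS, inS]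
  | cons c r ih =>
    constructor
    · intro lens
      by_cases hc : c = '`'
      · simp only [List.foldl_cons, stepA, if_pos hc]
        simpa [outS, hc] using ih.2 lens []
      · simp only [List.foldl_cons, stepA, if_neg hc]
        simpa [outS, hc] using ih.1 lens
    · intro lens acc
      by_cases hc : c = '`'
      · simp only [List.foldl_cons, stepA, if_pos hc]
        simpa [inS, hc] using ih.1 (lens ++ [(acc.length : Int)])
      · simp only [List.foldl_cons, stepA, if_neg hc]
        simpa [inS, hc] using ih.2 lens (acc ++ [c])

-- B's pairing of the split pieces yields exactly the closed-span lengths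
lemma pair_spec (cs : List Char) :
    ((pairUp ((spR [] cs).tail)).map (fun p => ((p.1.length : Int))) = outS cs)
    ∧ (∀ acc : List Char,
        (pairUp (spR acc cs)).map (fun p => ((p.1.length : Int))) = inS acc.reverse cs) := by
  induction cs with
  | nil => simp [spR, pairUp, outS, inS]
  | cons c r ih =>
    constructor
    · by_cases hc : c = '`'
      · simpa [spR, hc, outS] using ih.2 []
      · simp only [spR, outS, hc, if_false]
        rw [tail_spR r [c]]
        exact ih.1
    · intro acc
      by_cases hc : c = '`'
      · obtain ⟨h, t, hht⟩ : ∃ h t, spR ([] : List Char) r = h :: t := by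
          cases hh : spR ([] : List Char) r with
          | nil => exact absurd hh (spR_ne_nil r [])
          | cons h t => exact ⟨h, t, rfl⟩
        subst hc
        have h1 := ih.1
        rw [hht] at h1
        simp only [List.tail_cons] at h1
        simp [spR, inS, hht, pairUp, h1]
      · simp only [spR, inS, hc, if_false]
        simpa using ih.2 (c :: acc)

lemma nonneg_spec (cs : List Char) :
    (∀ x ∈ outS cs, 0 ≤ x) ∧ (∀ acc : List Char, ∀ x ∈ inS acc cs, 0 ≤ x) := by
  induction cs with
  | nil => simp [outS, inS]
  | cons c r ih =>
    constructor
    · intro x hx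
      by_cases hc : c = '`'
      · simp only [outS, if_pos hc] at hx; exact ih.2 [] x hx
      · simp only [outS, if_neg hc] at hx; exact ih.1 x hx
    · intro acc x hx
      by_cases hc : c = '`'
      · simp only [inS, if_pos hc, List.mem_cons] at hx
        rcases hx with h | h
        · subst h; positivity
        · exact ih.1 x h
      · simp only [inS, if_neg hc] at hx; exact ih.2 (acc ++ [c]) x hx

-- max([0] + xs) = max(xs, default=0) when every element of xs is nonnegative
lemma max_cons_zero (xs : List Int) (h : ∀ x ∈ xs, 0 ≤ x) :
    (PySem.List.max? ((0 : Int) :: xs) id).getD 0 = PySem.List.maxD xs id 0 := by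
  unfold PySem.List.maxD PySem.List.max?
  cases xs with
  | nil => rfl
  | cons y ys =>
    have hy : 0 ≤ y := h y (by simp)
    have hstep : (if id (0 : Int) < id y then some y else some 0) = some y := by
      by_cases h0 : (0 : Int) < y
      · simp [h0]
      · have : y = 0 := le_antisymm (not_lt.mp h0) hy
        simp [this]
    simp only [List.foldl_cons]
    change (List.foldl _ (if id (0 : Int) < id y then some y else some 0) ys).getD 0
      = (List.foldl _ (some y) ys).getD 0
    rw [hstep]

-- ===== VERDICT (by name: the statement is the Claim_ definition above) =====
theorem frac_count_spec : Claim_equal_frac_count := by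
  intro s _
  unfold Spec_frac_count
  have hslice : PySem.List.slice (PySem.Chars.splitOn s.toList ['`']) (some 1) none
      = (PySem.Chars.splitOn s.toList ['`']).tail := by
    simp [PySem.List.slice_from, List.drop_one]
  simp only [frac_count, frac_count_alt]
  rw [hslice, splitOn_eq_spR, (pair_spec s.toList).1, (fold_spec s.toList).1 [0]]
  exact max_cons_zero (outS s.toList) (nonneg_spec s.toList).1
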